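-- pv_equiv track=rewrite | github.com/txhno/ecommerce-data-formatting | src/core/import_formatter.py | find_brand_size_column
-- ===== SOURCE A (Python) =====
-- from typing import Optional
--
-- def find_brand_size_column(columns) -> Optional[str]:
--     """Find the brand size column (starts brand size columns)."""
--     for c in columns:
--         s = str(c).lower()
--         if "brand" in s and "size" in s:
--             return c
--     for c in columns:
--         if "size" in str(c).lower():
--             return c
--     return None
-- ===== SOURCE B (Python) =====
-- def find_brand_size_column(columns):
--     """Single pass: return first brand+size column; otherwise first size-only column."""
--     fallback = None
--     for c in columns:
--         s = str(c).lower()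
--         if "brand" in s and "size" in s:
--             return c
--         if "size" in s and fallback is None:
--             fallback = c
--     return fallback
-- ===== Notes on version B (the rewrite author's own statement) =====
-- stated objective: alternative
-- what changed: Replaces A's two sequential scans (first for brand+size, then for size-only) with one scan carrying a fallback candidate, lowercasing each column once instead of up to twice.
import Mathlib
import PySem

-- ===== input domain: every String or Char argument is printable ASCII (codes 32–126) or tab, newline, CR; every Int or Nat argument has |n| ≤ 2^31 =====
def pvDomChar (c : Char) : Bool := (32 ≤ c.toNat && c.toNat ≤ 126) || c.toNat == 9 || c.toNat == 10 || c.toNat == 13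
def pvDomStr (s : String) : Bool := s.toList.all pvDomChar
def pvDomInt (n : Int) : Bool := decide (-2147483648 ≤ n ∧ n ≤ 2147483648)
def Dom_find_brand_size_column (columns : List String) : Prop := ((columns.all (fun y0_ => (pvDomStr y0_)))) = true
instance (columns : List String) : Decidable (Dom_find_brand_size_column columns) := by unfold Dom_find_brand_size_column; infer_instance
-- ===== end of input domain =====

-- B replaces A's two sequential scans with one scan carrying a fallback candidate (same cost, different decomposition).


-- ===== PORT A =====
-- first loop of A: return first column whose lowercased form contains "brand" and "size"
def pvALoop1 (columns : List String) : Option String :=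
  match columns with
  | [] => none
  | c :: rest =>
      let s := PySem.Str.lower c
      if PySem.Str.isIn "brand" s && PySem.Str.isIn "size" s then some c
      else pvALoop1 rest

-- second loop of A: return first column whose lowercased form contains "size"
def pvALoop2 (columns : List String) : Option String :=
  match columns with
  | [] => none
  | c :: rest =>
      if PySem.Str.isIn "size" (PySem.Str.lower c) then some c
      else pvALoop2 rest

def find_brand_size_column (columns : List String) : Option String :=
  match pvALoop1 columns with
  | some c => some c
  | none => pvALoop2 columns

-- ===== PORT B =====
-- B: one scan carrying the first size-only candidate in `fallback`
def pvBLoop (columns : List String) (fallback : Option String) : Option String :=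
  match columns with
  | [] => fallback
  | c :: rest =>
      let s := PySem.Str.lower c
      if PySem.Str.isIn "brand" s && PySem.Str.isIn "size" s then some c
      else if PySem.Str.isIn "size" s && fallback.isNone then pvBLoop rest (some c)
      else pvBLoop rest fallback

def find_brand_size_column_alt (columns : List String) : Option String :=
  pvBLoop columns none

-- ===== PRECONDITION & SPEC =====
def Spec_find_brand_size_column (columns : List String) (out : Option String) : Prop := out = find_brand_size_column_alt columns
instance (columns : List String) (out : Option String) : Decidable (Spec_find_brand_size_column columns out) := by unfold Spec_find_brand_size_column; infer_instance

-- ===== CLAIM (what is proved, stated in full; the proofs are below) =====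
def Claim_equal_find_brand_size_column : Prop := ∀ (columns : List String), Dom_find_brand_size_column columns → Spec_find_brand_size_column columns (find_brand_size_column columns)

-- ===== LEMMAS AND PROOFS =====
-- B's loop with fallback fb computes: first brand+size match, else fb if set, else first size match
theorem pvBLoop_eq (columns : List String) (fb : Option String) :
    pvBLoop columns fb =
      match pvALoop1 columns with
      | some c => some c
      | none => match fb with
                | some f => some f
                | none => pvALoop2 columns := by
  induction columns generalizing fb with
  | nil => cases fb <;> simp [pvBLoop, pvALoop1, pvALoop2]
  | cons c rest ih =>
      simp only [pvBLoop, pvALoop1, pvALoop2]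
      split_ifs with hb hs <;> cases fb <;> simp_all

-- ===== VERDICT (by name: the statement is the Claim_ definition above) =====
theorem find_brand_size_column_spec : Claim_equal_find_brand_size_column := by
  intro columns _
  unfold Spec_find_brand_size_column find_brand_size_column find_brand_size_column_alt
  rw [pvBLoop_eq]
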